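-- pv_equiv track=rewrite | github.com/nightingal3/midtraining | util_scripts/fetch_ablation_results.py | sort_tags
-- ===== SOURCE A (Python) =====
-- def sort_tags(tags):
--         """Sort tags with step numbers in numerical order."""
--         step_tags = []
--         other_tags = []
--
--         for tag in tags:
--             if tag.startswith("step-"):
--                 try:
--                     step_num = int(tag.split("-")[1])
--                     step_tags.append((step_num, tag))
--                 except (IndexError, ValueError):
--                     other_tags.append(tag)
--             else:
--                 other_tags.append(tag)
--
--         # Sort step tags by number, other tags alphabetically
--         step_tags.sort(key=lambda x: x[0])
--         other_tags.sort()
--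
--         return [tag for _, tag in step_tags] + other_tags
-- ===== SOURCE B (Python) =====
-- def sort_tags(tags):
--     """Sort tags with step numbers in numerical order."""
--     def keyfn(tag):
--         if tag.startswith("step-"):
--             try:
--                 return (0, int(tag.split("-")[1]), "")
--             except (IndexError, ValueError):
--                 pass
--         return (1, 0, tag)
--     return sorted(tags, key=keyfn)
-- ===== Notes on version B (the rewrite author's own statement) =====
-- stated objective: simpler
-- what changed: Replaces A's two-bucket partition followed by two independent sorts and a re-merge with a single stable sorted(tags, key=keyfn), where keyfn maps step tags to (0, step_num, "") and all other tags to (1, 0, tag); the leading 0/1 keeps step tags first and stability reproduces A's tie order exactly.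
import Mathlib
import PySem

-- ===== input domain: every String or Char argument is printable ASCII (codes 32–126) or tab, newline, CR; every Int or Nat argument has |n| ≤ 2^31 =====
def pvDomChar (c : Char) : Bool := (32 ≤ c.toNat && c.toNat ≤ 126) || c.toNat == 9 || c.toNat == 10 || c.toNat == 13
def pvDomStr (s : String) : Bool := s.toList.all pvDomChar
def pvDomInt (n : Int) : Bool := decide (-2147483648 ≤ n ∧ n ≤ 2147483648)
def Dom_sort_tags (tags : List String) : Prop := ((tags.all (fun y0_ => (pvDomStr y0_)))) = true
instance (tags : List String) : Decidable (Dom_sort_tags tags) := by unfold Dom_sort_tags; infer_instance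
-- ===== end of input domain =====

-- B replaces A's two-bucket partition with two independent sorts by a single stable sort
-- under one composite key (simpler decomposition, same result; return value only — neither mutates its argument).

-- ===== PORT A =====
-- the for-loop with its two accumulators (step_tags, other_tags); "-" is a nonempty literal
-- separator so split? is always `some`; the `none` branch of the match is exactly A's
-- `except (IndexError, ValueError)`; Python's keyless str sort compares code points = toList order.
def sort_tags (tags : List String) : List String :=
  let p := tags.foldl
    (fun (acc : List (Int × String) × List String) tag =>
      if PySem.Str.startswith tag "step-" then
        match (PySem.List.pyGet? ((PySem.Str.split? tag "-").getD []) 1).bind PySem.Int.ofStr? with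
        | some n => (acc.1 ++ [(n, tag)], acc.2)
        | none   => (acc.1, acc.2 ++ [tag])
      else (acc.1, acc.2 ++ [tag]))
    ([], [])
  (PySem.List.sorted p.1 (fun x => x.1) false).map (fun x => x.2)
    ++ PySem.List.sorted p.2 (fun x => x.toList) false

-- ===== PORT B =====
-- Source B's keyfn: Python's tuple keys (0, n, "") / (1, 0, tag) are ported as lexicographically
-- ordered Int lists [0, n] / [1, 0, code points of tag…] — exactly Python's tuple comparison here
-- (the int/str-mixed third slot is only reached when the first two are equal, i.e. inside one group,
-- where on the step side both are "" and on the other side both are code-point lists = str order).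
def pvKeyB (tag : String) : List Int :=
  if PySem.Str.startswith tag "step-" then
    match (PySem.List.pyGet? ((PySem.Str.split? tag "-").getD []) 1).bind PySem.Int.ofStr? with
    | some n => [0, n]
    | none   => 1 :: 0 :: tag.toList.map (fun c => (c.toNat : Int))
  else 1 :: 0 :: tag.toList.map (fun c => (c.toNat : Int))

def sort_tags_alt (tags : List String) : List String :=
  PySem.List.sorted tags pvKeyB false

-- ===== PRECONDITION & SPEC =====
def Spec_sort_tags (tags : List String) (out : List String) : Prop := out = sort_tags_alt tags
instance (tags : List String) (out : List String) : Decidable (Spec_sort_tags tags out) := by unfold Spec_sort_tags; infer_instance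

-- ===== CLAIM (what is proved, stated in full; the proofs are below) =====
def Claim_equal_sort_tags : Prop := ∀ (tags : List String), Dom_sort_tags tags → Spec_sort_tags tags (sort_tags tags)

-- ===== LEMMAS AND PROOFS =====

-- A's (and Source B's) classification of a tag: `some n` iff the tag goes to step_tags with number n.
def pvStep? (t : String) : Option Int :=
  if PySem.Str.startswith t "step-" then
    (PySem.List.pyGet? ((PySem.Str.split? t "-").getD []) 1).bind PySem.Int.ofStr?
  else none

def pvIsStep (t : String) : Bool := (pvStep? t).isSome

def pvSteps (tags : List String) : List (Int × String) :=
  (tags.filter pvIsStep).map (fun t => ((pvStep? t).getD 0, t))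

def pvOthers (tags : List String) : List String := tags.filter (fun t => !pvIsStep t)

theorem pvKeyB_of_step {t : String} {n : Int} (h : pvStep? t = some n) :
    pvKeyB t = [0, n] := by
  unfold pvStep? at h
  unfold pvKeyB
  split at h
  · rw [if_pos ‹_›, h]
  · exact absurd h (by simp)

theorem pvKeyB_of_other {t : String} (h : pvStep? t = none) :
    pvKeyB t = 1 :: 0 :: t.toList.map (fun c => (c.toNat : Int)) := by
  unfold pvStep? at h
  unfold pvKeyB
  split at h
  · rw [if_pos ‹_›, h]
  · rw [if_neg ‹_›]

-- A's loop, characterised: it appends pvSteps / pvOthers to the accumulators.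
theorem pvFoldA (tags : List String) (s : List (Int × String)) (o : List String) :
    tags.foldl
      (fun (acc : List (Int × String) × List String) tag =>
        if PySem.Str.startswith tag "step-" then
          match (PySem.List.pyGet? ((PySem.Str.split? tag "-").getD []) 1).bind PySem.Int.ofStr? with
          | some n => (acc.1 ++ [(n, tag)], acc.2)
          | none   => (acc.1, acc.2 ++ [tag])
        else (acc.1, acc.2 ++ [tag])) (s, o)
      = (s ++ pvSteps tags, o ++ pvOthers tags) := by
  induction tags generalizing s o with
  | nil => simp [pvSteps, pvOthers]
  | cons t ts ih =>
    by_cases hs : PySem.Str.startswith t "step-"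
    · cases h : (PySem.List.pyGet? ((PySem.Str.split? t "-").getD []) 1).bind PySem.Int.ofStr? with
      | some n =>
        have hstep : pvStep? t = some n := by unfold pvStep?; rw [if_pos hs, h]
        simp only [List.foldl_cons, if_pos hs, h, ih]
        simp [pvSteps, pvOthers, pvIsStep, hstep]
      | none =>
        have hstep : pvStep? t = none := by unfold pvStep?; rw [if_pos hs, h]
        simp only [List.foldl_cons, if_pos hs, h, ih]
        simp [pvSteps, pvOthers, pvIsStep, hstep]
    · have hstep : pvStep? t = none := by unfold pvStep?; rw [if_neg hs]
      simp only [List.foldl_cons, if_neg hs, ih]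
      simp [pvSteps, pvOthers, pvIsStep, hstep]

-- insertion (one step of PySem's stable insertion sort) lemmas
theorem pvInsertBy_append_left {α : Type} (bef : α → α → Bool) (x : α) (S1 S2 : List α)
    (h : ∀ y ∈ S2, bef x y = true) :
    PySem.List.insertBy bef x (S1 ++ S2) = PySem.List.insertBy bef x S1 ++ S2 := by
  induction S1 with
  | nil =>
    cases S2 with
    | nil => rfl
    | cons y ys => simp [PySem.List.insertBy, h y (by simp)]
  | cons a as ih =>
    by_cases hb : bef x a <;> simp [PySem.List.insertBy, hb, ih]

theorem pvInsertBy_append_right {α : Type} (bef : α → α → Bool) (x : α) (S1 S2 : List α)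
    (h : ∀ y ∈ S1, bef x y = false) :
    PySem.List.insertBy bef x (S1 ++ S2) = S1 ++ PySem.List.insertBy bef x S2 := by
  induction S1 with
  | nil => rfl
  | cons a as ih =>
    simp only [List.cons_append, PySem.List.insertBy, h a (by simp)]
    simp only [Bool.false_eq_true, if_false, List.cons.injEq, true_and]
    exact ih (fun y hy => h y (by simp [hy]))

theorem pvInsertBy_congr {α : Type} (bef1 bef2 : α → α → Bool) (x : α) (ys : List α)
    (h : ∀ y ∈ ys, bef1 x y = bef2 x y) :
    PySem.List.insertBy bef1 x ys = PySem.List.insertBy bef2 x ys := by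
  induction ys with
  | nil => rfl
  | cons a as ih =>
    have ha := h a (by simp)
    by_cases hb : bef2 x a
    · simp [PySem.List.insertBy, ha, hb]
    · simp only [PySem.List.insertBy, ha, hb, Bool.false_eq_true, if_false, List.cons.injEq, true_and]
      exact ih (fun y hy => h y (by simp [hy]))

theorem pvInsertBy_map {α β : Type} (f : α → β) (bef : β → β → Bool) (x : α) (ys : List α) :
    PySem.List.insertBy bef (f x) (ys.map f)
      = (PySem.List.insertBy (fun a b => bef (f a) (f b)) x ys).map f := by
  induction ys with
  | nil => rfl
  | cons a as ih =>
    by_cases hb : bef (f x) (f a) <;> simp [PySem.List.insertBy, hb, ih]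

theorem pvSorted_append_last {α κ : Type} [LT κ] [DecidableLT κ] (xs : List α) (x : α) (key : α → κ) :
    PySem.List.sorted (xs ++ [x]) key false
      = PySem.List.insertBy (fun a b => decide (key a < key b)) x (PySem.List.sorted xs key false) := by
  rw [PySem.List.sorted_eq_foldl_insertBy, PySem.List.sorted_eq_foldl_insertBy, List.foldl_append]
  rfl

-- a stable sort is unchanged when the key is replaced by one inducing the same order on the elements
theorem pvSorted_congr {α κ1 κ2 : Type} [LT κ1] [DecidableLT κ1] [LT κ2] [DecidableLT κ2]
    (xs : List α) (k1 : α → κ1) (k2 : α → κ2)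
    (h : ∀ a ∈ xs, ∀ b ∈ xs, (k1 a < k1 b ↔ k2 a < k2 b)) :
    PySem.List.sorted xs k1 false = PySem.List.sorted xs k2 false := by
  induction xs using List.reverseRecOn with
  | nil => rfl
  | append_singleton ys y ih =>
    rw [pvSorted_append_last, pvSorted_append_last,
      ih (fun a ha b hb => h a (by simp [ha]) b (by simp [hb]))]
    exact pvInsertBy_congr _ _ y _ (fun z hz => by
      have hz' : z ∈ ys := by
        rw [PySem.List.mem_sorted] at hz; exact hz
      exact decide_eq_decide.mpr (h y (by simp) z (by simp [hz'])))

-- sorting a mapped list = mapping the sort under the composed key (stability preserved)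
theorem pvSorted_map {α β κ : Type} [LT κ] [DecidableLT κ] (f : α → β) (key : β → κ) (xs : List α) :
    PySem.List.sorted (xs.map f) key false
      = (PySem.List.sorted xs (fun x => key (f x)) false).map f := by
  induction xs using List.reverseRecOn with
  | nil => rfl
  | append_singleton ys y ih =>
    rw [List.map_append, List.map_singleton, pvSorted_append_last, pvSorted_append_last, ih,
      pvInsertBy_map]

-- a stable sort under a key that puts every p-element strictly below every non-p-element
-- is the sort of the p-part followed by the sort of the rest
theorem pvSorted_split {α κ : Type} [LT κ] [DecidableLT κ] (p : α → Bool) (key : α → κ) (xs : List α)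
    (h : ∀ x y, p x = true → p y = false → key x < key y)
    (h2 : ∀ x y, p x = true → p y = false → ¬ key y < key x) :
    PySem.List.sorted xs key false
      = PySem.List.sorted (xs.filter p) key false
        ++ PySem.List.sorted (xs.filter (fun a => !p a)) key false := by
  induction xs using List.reverseRecOn with
  | nil => rfl
  | append_singleton ys y ih =>
    rw [pvSorted_append_last, ih, List.filter_append, List.filter_append]
    by_cases hp : p y
    · have hfp : List.filter p [y] = [y] := by simp [hp]
      have hfn : List.filter (fun a => !p a) [y] = [] := by simp [hp]
      rw [hfp, hfn, List.append_nil, pvSorted_append_last,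
        pvInsertBy_append_left _ y _ _ (fun z hz => by
          have hz' : p z = false := by
            rw [PySem.List.mem_sorted, List.mem_filter] at hz
            simpa using hz.2
          exact decide_eq_true (h y z hp hz'))]
    · have hfp : List.filter p [y] = [] := by simp [hp]
      have hfn : List.filter (fun a => !p a) [y] = [y] := by simp [hp]
      rw [hfp, hfn, List.append_nil, pvSorted_append_last,
        pvInsertBy_append_right _ y _ _ (fun z hz => by
          have hz' : p z = true := by
            rw [PySem.List.mem_sorted, List.mem_filter] at hz
            exact hz.2
          exact decide_eq_false (h2 z y hz' (by simpa using hp)))]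

-- code-point lists compare exactly as the character lists themselves
theorem pvMapLt (xs ys : List Char) :
    xs.map (fun c => (c.toNat : Int)) < ys.map (fun c => (c.toNat : Int)) ↔ xs < ys := by
  induction xs generalizing ys with
  | nil => cases ys <;> simp [List.nil_lt_cons]
  | cons c cs ih =>
    cases ys with
    | nil => simp [List.not_lt_nil]
    | cons d ds =>
      simp only [List.map_cons, List.cons_lt_cons_iff, ih, Int.ofNat_lt, Int.ofNat_inj]
      constructor
      · rintro (hlt | ⟨he, hl⟩)
        · exact Or.inl (by exact hlt)
        · exact Or.inr ⟨Char.ext (UInt32.toNat_inj.mp he), hl⟩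
      · rintro (hlt | ⟨he, hl⟩)
        · exact Or.inl (by exact hlt)
        · exact Or.inr ⟨by rw [he], hl⟩

theorem pvMap_snd_steps (tags : List String) :
    (pvSteps tags).map Prod.snd = tags.filter pvIsStep := by
  simp [pvSteps, Function.comp_def]

theorem pvMem_steps {tags : List String} {a : Int × String} (ha : a ∈ pvSteps tags) :
    pvStep? a.2 = some a.1 := by
  unfold pvSteps at ha
  rcases List.mem_map.mp ha with ⟨t, ht, rfl⟩
  have := (List.mem_filter.mp ht).2
  unfold pvIsStep at this
  cases h : pvStep? t with
  | none => rw [h] at this; simp at this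
  | some n => simp

-- ===== VERDICT (by name: the statement is the Claim_ definition above) =====
theorem sort_tags_spec : Claim_equal_sort_tags := by
  intro tags _
  unfold Spec_sort_tags sort_tags sort_tags_alt
  rw [pvFoldA]
  simp only [List.nil_append]
  -- split B's single sort into the step part and the other part
  rw [pvSorted_split pvIsStep pvKeyB tags
    (by
      intro x y hx hy
      unfold pvIsStep at hx hy
      rcases hnx : pvStep? x with _ | n
      · rw [hnx] at hx; simp at hx
      rcases hny : pvStep? y with _ | m
      · rw [pvKeyB_of_step hnx, pvKeyB_of_other hny, List.cons_lt_cons_iff]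
        left; norm_num
      · rw [hny] at hy; simp at hy)
    (by
      intro x y hx hy
      unfold pvIsStep at hx hy
      rcases hnx : pvStep? x with _ | n
      · rw [hnx] at hx; simp at hx
      rcases hny : pvStep? y with _ | m
      · rw [pvKeyB_of_step hnx, pvKeyB_of_other hny, List.cons_lt_cons_iff]
        norm_num
      · rw [hny] at hy; simp at hy)]
  congr 1
  · -- step tags: B's sort of them = map snd of A's sort of the decorated pairs
    rw [← pvMap_snd_steps, pvSorted_map]
    congr 1
    refine (pvSorted_congr (pvSteps tags) (fun x => pvKeyB x.2) (fun x => x.1) ?_).symm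
    intro a ha b hb
    simp only []
    rw [pvKeyB_of_step (pvMem_steps ha), pvKeyB_of_step (pvMem_steps hb)]
    simp [List.cons_lt_cons_iff]
  · -- other tags: B's key orders them exactly as their character lists
    unfold pvOthers
    refine (pvSorted_congr (tags.filter (fun t => !pvIsStep t)) pvKeyB (fun x => x.toList) ?_).symm
    intro a ha b hb
    have hna : pvStep? a = none := by
      have := (List.mem_filter.mp ha).2
      unfold pvIsStep at this
      cases h : pvStep? a with
      | none => rfl
      | some n => rw [h] at this; simp at this
    have hnb : pvStep? b = none := by
      have := (List.mem_filter.mp hb).2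
      unfold pvIsStep at this
      cases h : pvStep? b with
      | none => rfl
      | some n => rw [h] at this; simp at this
    rw [pvKeyB_of_other hna, pvKeyB_of_other hnb]
    simp [pvMapLt]
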